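-- pv_equiv track=rewrite | github.com/matthewyu01/advent-of-code | 2019/Day03/day3.py | find_closest_intersection
-- ===== SOURCE A (Python) =====
-- def find_closest_intersection(intersections, center = [0,0]):
--     closest = intersections[0]
--     inter = intersections[0]
--     closest_dist = abs(center[0] - inter[0]) + abs(center[1] - inter[1])
--
--     if len(intersections) > 1:
--         for inter in intersections[1:]:
--             l1_dist = abs(center[0] - inter[0]) + abs(center[1] - inter[1])
--             if l1_dist < closest_dist:
--                 closest_dist = l1_dist
--                 closest = inter
--
--     return closest, closest_dist
-- ===== SOURCE B (Python) =====
-- def find_closest_intersection(intersections, center=[0, 0]):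
--     dists = [abs(center[0] - p[0]) + abs(center[1] - p[1]) for p in intersections]
--     m = min(dists)
--     i = dists.index(m)
--     return intersections[i], m
-- ===== Notes on version B (the rewrite author's own statement) =====
-- stated objective: idiomatic
-- what changed: Replaces the inline running-minimum scan over points with a materialised distance table followed by min() and a first-index lookup, indexing back into the input list.
import Mathlib
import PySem

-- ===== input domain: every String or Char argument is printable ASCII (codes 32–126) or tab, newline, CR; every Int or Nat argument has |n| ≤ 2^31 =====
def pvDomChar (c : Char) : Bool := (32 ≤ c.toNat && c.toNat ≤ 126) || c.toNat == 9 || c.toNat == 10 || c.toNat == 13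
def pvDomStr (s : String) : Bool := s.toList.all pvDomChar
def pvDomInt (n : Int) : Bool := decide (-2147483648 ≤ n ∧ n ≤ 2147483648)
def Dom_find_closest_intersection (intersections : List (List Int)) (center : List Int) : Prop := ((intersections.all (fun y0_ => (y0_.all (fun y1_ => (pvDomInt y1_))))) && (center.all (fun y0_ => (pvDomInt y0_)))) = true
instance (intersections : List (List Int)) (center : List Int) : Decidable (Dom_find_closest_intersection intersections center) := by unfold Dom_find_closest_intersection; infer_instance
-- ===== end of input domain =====

-- B rebuilds the same result as a distance table + min() + first-index lookup instead of A's
-- running-minimum scan; same O(n) cost, different decomposition.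

-- ===== PORT A =====
-- shared by both ports: abs(center[0]-p[0]) + abs(center[1]-p[1]); pyGetD is exact under Pre_
def pvDist (center p : List Int) : Int :=
  |PySem.List.pyGetD center 0 0 - PySem.List.pyGetD p 0 0| +
  |PySem.List.pyGetD center 1 0 - PySem.List.pyGetD p 1 0|

def find_closest_intersection (intersections : List (List Int)) (center : List Int) : List Int × Int :=
  match intersections with
  | [] => ([], 0)  -- unreachable under Pre_ (Python raises IndexError on [])
  | inter :: rest =>
      rest.foldl (fun acc inter =>
        let l1_dist := pvDist center inter
        if l1_dist < acc.2 then (inter, l1_dist) else acc)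
        (inter, pvDist center inter)

-- ===== PORT B =====
def find_closest_intersection_alt (intersections : List (List Int)) (center : List Int) : List Int × Int :=
  let dists := intersections.map (pvDist center)
  match PySem.List.min? dists (fun x => x) with
  | none => ([], 0)  -- unreachable under Pre_ (Python min([]) raises ValueError)
  | some m =>
      match PySem.List.index? dists m with
      | some i => (intersections.getD i [], m)
      | none => ([], m)  -- unreachable: the minimum is a member of dists

-- ===== PRECONDITION & SPEC =====
-- Pre_ excludes exactly the inputs where the Python A raises IndexError:
-- empty intersections, or a point/center with fewer than two coordinates.
def Pre_find_closest_intersection (intersections : List (List Int)) (center : List Int) : Prop :=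
  intersections ≠ [] ∧ 2 ≤ center.length ∧ ∀ p ∈ intersections, 2 ≤ p.length
instance (intersections : List (List Int)) (center : List Int) : Decidable (Pre_find_closest_intersection intersections center) := by unfold Pre_find_closest_intersection; infer_instance

def pvWitness_find_closest_intersection : List (List Int) × List Int := ([[3, 4], [1, 1], [2, 0]], [0, 0])

def Spec_find_closest_intersection (intersections : List (List Int)) (center : List Int) (out : List Int × Int) : Prop := out = find_closest_intersection_alt intersections center
instance (intersections : List (List Int)) (center : List Int) (out : List Int × Int) : Decidable (Spec_find_closest_intersection intersections center out) := by unfold Spec_find_closest_intersection; infer_instance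

-- ===== CLAIM (what is proved, stated in full; the proofs are below) =====
def Claim_equal_find_closest_intersection : Prop := ∀ (intersections : List (List Int)) (center : List Int), Dom_find_closest_intersection intersections center → Pre_find_closest_intersection intersections center → Spec_find_closest_intersection intersections center (find_closest_intersection intersections center)

-- ===== LEMMAS AND PROOFS =====

theorem alt_cons_eq (center x : List Int) (rest : List (List Int)) :
    find_closest_intersection_alt (x :: rest) center =
      match PySem.List.index? (pvDist center x :: rest.map (pvDist center))
          ((rest.map (pvDist center)).foldl min (pvDist center x)) with
      | some i => ((x :: rest).getD i [], (rest.map (pvDist center)).foldl min (pvDist center x))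
      | none => ([], (rest.map (pvDist center)).foldl min (pvDist center x)) := by
  simp [find_closest_intersection_alt, PySem.List.min?_id_cons]

theorem key_lemma (center : List Int) :
    ∀ (rest : List (List Int)) (x : List Int),
      rest.foldl (fun acc inter =>
          let l1_dist := pvDist center inter
          if l1_dist < acc.2 then (inter, l1_dist) else acc)
          (x, pvDist center x)
        = find_closest_intersection_alt (x :: rest) center := by
  intro rest
  induction rest with
  | nil =>
      intro x
      simp [find_closest_intersection_alt, PySem.List.min?_id_cons]
  | cons y ys ih =>
      intro x
      rw [List.foldl_cons]
      by_cases h : pvDist center y < pvDist center x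
      · -- the new point strictly improves: A restarts from y; list-wise x is never the argmin
        simp only [h, if_pos]
        rw [ih y, alt_cons_eq, alt_cons_eq]
        simp only [List.map_cons]
        have hmin : min (pvDist center x) (pvDist center y) = pvDist center y :=
          min_eq_right (le_of_lt h)
        have hfold : List.foldl min (pvDist center x) (pvDist center y :: ys.map (pvDist center))
            = List.foldl min (pvDist center y) (ys.map (pvDist center)) := by
          rw [List.foldl_cons, hmin]
        set m := (ys.map (pvDist center)).foldl min (pvDist center y) with hm
        have hm2 : PySem.List.min? (pvDist center y :: ys.map (pvDist center)) (fun z => z)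
            = some m := by
          simp [PySem.List.min?_id_cons, hm]
        have hmem : m ∈ pvDist center y :: ys.map (pvDist center) :=
          PySem.List.min?_mem hm2
        have hle : m ≤ pvDist center y := PySem.List.min?_isMin hm2 _ (by simp)
        have hne : pvDist center x ≠ m := by omega
        rw [hfold, PySem.List.index?_cons_of_ne _ hne]
        obtain ⟨i, hi⟩ := Option.isSome_iff_exists.1
          ((PySem.List.index?_isSome_iff (pvDist center y :: ys.map (pvDist center)) m).2 hmem)
        rw [hi]
        simp
      · -- no improvement: A keeps x; y is never the argmin of the full list
        simp only [h, if_neg, not_false_iff]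
        rw [ih x, alt_cons_eq, alt_cons_eq]
        simp only [List.map_cons]
        have hxy : pvDist center x ≤ pvDist center y := le_of_not_gt h
        have hmin : min (pvDist center x) (pvDist center y) = pvDist center x :=
          min_eq_left hxy
        have hfold : List.foldl min (pvDist center x) (pvDist center y :: ys.map (pvDist center))
            = List.foldl min (pvDist center x) (ys.map (pvDist center)) := by
          rw [List.foldl_cons, hmin]
        set m := (ys.map (pvDist center)).foldl min (pvDist center x) with hm
        have hm2 : PySem.List.min? (pvDist center x :: ys.map (pvDist center)) (fun z => z)
            = some m := by
          simp [PySem.List.min?_id_cons, hm]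
        have hmem : m ∈ pvDist center x :: ys.map (pvDist center) :=
          PySem.List.min?_mem hm2
        have hle : m ≤ pvDist center x := PySem.List.min?_isMin hm2 _ (by simp)
        rw [hfold]
        by_cases hx : pvDist center x = m
        · rw [hx, PySem.List.index?_cons_self, PySem.List.index?_cons_self]
          simp
        · have hyne : pvDist center y ≠ m := by omega
          have hmt : m ∈ ys.map (pvDist center) :=
            (List.mem_cons.1 hmem).resolve_left (fun e => hx e.symm)
          rw [PySem.List.index?_cons_of_ne (pvDist center y :: ys.map (pvDist center)) (fun he => hx he),
              PySem.List.index?_cons_of_ne (ys.map (pvDist center)) (fun he => hyne he),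
              PySem.List.index?_cons_of_ne (ys.map (pvDist center)) (fun he => hx he)]
          obtain ⟨i, hi⟩ := Option.isSome_iff_exists.1
            ((PySem.List.index?_isSome_iff (ys.map (pvDist center)) m).2 hmt)
          rw [hi]
          simp

-- ===== VERDICT (by name: the statement is the Claim_ definition above) =====
theorem find_closest_intersection_spec : Claim_equal_find_closest_intersection := by
  intro intersections center _ hpre
  obtain ⟨hne, -, -⟩ := hpre
  match intersections with
  | [] => exact absurd rfl hne
  | x :: rest =>
      show find_closest_intersection (x :: rest) center = _
      rw [find_closest_intersection]
      exact key_lemma center rest x
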